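-- pv_equiv track=rewrite | github.com/ElectrodeYT/ai-t9 | src/ai_t9/model/char_ngram_encoder.py | build_ngram_vocab
-- ===== SOURCE A (Python) =====
-- from typing import Sequence
--
-- def _char_ngrams(word: str, ns: tuple[int, ...] = (2, 3)) -> list[str]:
--     """Return all character n-grams for ``word`` with fastText-style boundaries.
--
--     The word is wrapped in ``<`` and ``>`` to distinguish prefixes/suffixes
--     from mid-word substrings.  For example ``"the"`` with ``ns=(2, 3)`` gives:
--         ``["<t", "th", "he", "e>", "<th", "the", "he>"]``
--     """
--     marked = "<" + word.lower() + ">"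
--     ngrams: list[str] = []
--     for n in ns:
--         for i in range(len(marked) - n + 1):
--             ngrams.append(marked[i : i + n])
--     return ngrams
--
-- def build_ngram_vocab(
--     words: Sequence[str],
--     ns: tuple[int, ...] = (2, 3),
-- ) -> dict[str, int]:
--     """Build a {ngram: id} mapping from a collection of words.
--
--     ID 0 is reserved for the UNK sentinel (unseen n-grams contribute zero).
--     IDs are assigned in order of first appearance, deterministically sorted.
--     """
--     seen: set[str] = set()
--     for w in words:
--         seen.update(_char_ngrams(w, ns))
--     # Sort for determinism; reserve 0 for UNK.
--     ngram_to_id: dict[str, int] = {g: i + 1 for i, g in enumerate(sorted(seen))}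
--     return ngram_to_id
-- ===== SOURCE B (Python) =====
-- def _char_ngrams(word, ns=(2, 3)):
--     marked = "<" + word.lower() + ">"
--     ngrams = []
--     for n in ns:
--         for i in range(len(marked) - n + 1):
--             ngrams.append(marked[i : i + n])
--     return ngrams
--
--
-- def build_ngram_vocab(words, ns=(2, 3)):
--     # Collect every n-gram WITH duplicates, sort once, then assign ids in one
--     # adjacency-dedup scan -- no set is ever built.
--     flat = []
--     for w in words:
--         flat.extend(_char_ngrams(w, ns))
--     flat = sorted(flat)
--     vocab = {}
--     prev = None
--     next_id = 0
--     for g in flat: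
--         if g != prev:
--             next_id += 1
--             vocab[g] = next_id
--             prev = g
--     return vocab
-- ===== Notes on version B (the rewrite author's own statement) =====
-- stated objective: alternative
-- what changed: Instead of accumulating a set of n-grams and enumerating its sorted elements, B flattens all n-grams (with duplicates) into one list, sorts it once, and assigns ids in a single adjacency-comparison dedup scan — no set is ever constructed.
import Mathlib
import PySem

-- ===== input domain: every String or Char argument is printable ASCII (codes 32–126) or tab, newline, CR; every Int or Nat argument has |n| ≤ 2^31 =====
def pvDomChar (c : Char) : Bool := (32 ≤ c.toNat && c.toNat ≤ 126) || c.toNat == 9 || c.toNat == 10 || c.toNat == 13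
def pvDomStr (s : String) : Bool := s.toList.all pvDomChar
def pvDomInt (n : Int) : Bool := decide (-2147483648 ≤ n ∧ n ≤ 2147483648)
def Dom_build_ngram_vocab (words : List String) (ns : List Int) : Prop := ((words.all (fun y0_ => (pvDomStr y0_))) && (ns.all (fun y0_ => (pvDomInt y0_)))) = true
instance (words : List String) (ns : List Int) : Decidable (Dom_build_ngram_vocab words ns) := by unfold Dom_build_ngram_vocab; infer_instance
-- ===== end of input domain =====

-- B replaces A's set accumulation + enumerate(sorted(set)) by one sort of the full
-- duplicate n-gram list followed by an adjacency-dedup id-assignment scan (objective: alternative).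

-- ===== PORT A =====
-- shared helper: _char_ngrams (identical in Source A and Source B); the inner
-- 'for i in range(...): ngrams.append(...)' loop is ported in its canonical
-- 'acc ++ map' form (PySem.List.foldl_append_if loop shape), same order, same elements
def pyCharNgrams (word : String) (ns : List Int) : List String :=
  let marked : List Char := ('<' :: (PySem.Str.lower word).toList) ++ ['>']
  ns.foldl (fun ngrams n =>
    ngrams ++ (PySem.List.pyRange 0 ((marked.length : Int) - n + 1)).map
      (fun i => String.ofList (PySem.List.slice marked (some i) (some (i + n))))) []

def build_ngram_vocab (words : List String) (ns : List Int) : List (String × Int) :=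
  let seen : PySem.Set String :=
    words.foldl (fun s w => PySem.Set.update s (pyCharNgrams w ns)) PySem.Set.empty
  ((PySem.List.enumerate (PySem.List.sorted seen (fun g => g))).foldl
      (fun d p => d.insert p.2 (p.1 + 1)) PySem.Dict.empty).items

-- ===== PORT B =====
def build_ngram_vocab_alt (words : List String) (ns : List Int) : List (String × Int) :=
  let flat : List String := words.foldl (fun acc w => acc ++ pyCharNgrams w ns) []
  -- sorted(flat) ported as Mathlib's mergeSort (the corresponding library sort)
  let res : PySem.Dict String Int × Option String × Int :=
    (flat.mergeSort (fun a b => decide (a ≤ b))).foldl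
      (fun st g =>
        if some g ≠ st.2.1 then (st.1.insert g (st.2.2 + 1), some g, st.2.2 + 1) else st)
      (PySem.Dict.empty, none, 0)
  res.1.items

-- ===== PRECONDITION & SPEC =====
def Spec_build_ngram_vocab (words : List String) (ns : List Int) (out : List (String × Int)) : Prop := out = build_ngram_vocab_alt words ns
instance (words : List String) (ns : List Int) (out : List (String × Int)) : Decidable (Spec_build_ngram_vocab words ns out) := by unfold Spec_build_ngram_vocab; infer_instance

-- ===== CLAIM (what is proved, stated in full; the proofs are below) =====
def Claim_equal_build_ngram_vocab : Prop := ∀ (words : List String) (ns : List Int), Dom_build_ngram_vocab words ns → Spec_build_ngram_vocab words ns (build_ngram_vocab words ns)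

-- ===== LEMMAS AND PROOFS =====

-- the list of distinct n-grams in order, as B's scan encounters them
def adjDedup : List String → Option String → List String
  | [], _ => []
  | g :: t, prev => if some g ≠ prev then g :: adjDedup t (some g) else adjDedup t prev

-- pair each element with its 1-based id starting after n
def tagFrom : List String → Int → List (String × Int)
  | [], _ => []
  | g :: t, n => (g, n + 1) :: tagFrom t (n + 1)

lemma seen_eq (ns : List Int) (words : List String) (acc : List String) :
    words.foldl (fun s w => PySem.Set.update s (pyCharNgrams w ns)) (PySem.Set.ofList acc)
      = PySem.Set.ofList (words.foldl (fun a w => a ++ pyCharNgrams w ns) acc) := by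
  induction words generalizing acc with
  | nil => rfl
  | cons w t ih => simp only [List.foldl_cons, ← PySem.Set.ofList_append, ih]

lemma bscan (l : List String) (d : PySem.Dict String Int) (prev : Option String) (nid : Int) :
    (l.foldl
        (fun st g =>
          if some g ≠ st.2.1 then (st.1.insert g (st.2.2 + 1), some g, st.2.2 + 1) else st)
        (d, prev, nid)).1
      = (tagFrom (adjDedup l prev) nid).foldl (fun d p => d.insert p.1 p.2) d := by
  induction l generalizing d prev nid with
  | nil => rfl
  | cons g t ih =>
    by_cases h : some g ≠ prev
    · simp only [List.foldl_cons, adjDedup, if_pos h, tagFrom, ih]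
    · simp only [List.foldl_cons, adjDedup, if_neg h, ih]

lemma enum_tag (l : List String) (d : PySem.Dict String Int) (n : Int) :
    (PySem.List.enumerate l n).foldl (fun d p => d.insert p.2 (p.1 + 1)) d
      = (tagFrom l n).foldl (fun d p => d.insert p.1 p.2) d := by
  induction l generalizing d n with
  | nil => rfl
  | cons g t ih => simp only [PySem.List.enumerate, List.foldl_cons, tagFrom, ih]

lemma adj_main (l : List String) (hs : l.Pairwise (· ≤ ·)) :
    ∀ prev, (∀ x ∈ l, ∀ p, prev = some p → p ≤ x) →
      (adjDedup l prev).Pairwise (· < ·)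
      ∧ (∀ x, x ∈ adjDedup l prev ↔ (x ∈ l ∧ some x ≠ prev))
      ∧ (∀ x ∈ adjDedup l prev, ∀ p, prev = some p → p < x) := by
  induction l with
  | nil => intro prev _; refine ⟨List.Pairwise.nil, ?_, ?_⟩ <;> simp [adjDedup]
  | cons g t ih =>
    intro prev hlb
    rcases List.pairwise_cons.1 hs with ⟨hg, ht⟩
    by_cases h : some g ≠ prev
    · have ihh := ih ht (some g) (fun x hx p hp => by
        cases hp; exact hg x hx)
      rcases ihh with ⟨hpw, hmem, hgt⟩
      refine ⟨?_, ?_, ?_⟩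
      · simp only [adjDedup, if_pos h]
        exact List.pairwise_cons.2 ⟨fun x hx => hgt x hx g rfl, hpw⟩
      · intro x
        simp only [adjDedup, if_pos h, List.mem_cons]
        constructor
        · rintro (rfl | hx)
          · exact ⟨Or.inl rfl, h⟩
          · rcases (hmem x).1 hx with ⟨hxt, hxg⟩
            refine ⟨Or.inr hxt, ?_⟩
            intro hxp
            have hgx : g < x := lt_of_le_of_ne (hg x hxt) (fun e => hxg (by simp [e]))
            rcases prev with _ | p
            · exact absurd hxp (by simp)
            · have h1 : p ≤ g := hlb g (List.mem_cons_self) p rfl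
              have h2 : p < x := lt_of_le_of_lt h1 hgx
              simp only [Option.some.injEq] at hxp
              exact absurd hxp (ne_of_gt h2)
        · rintro ⟨(rfl | hxt), hxp⟩
          · exact Or.inl rfl
          · by_cases e : x = g
            · exact Or.inl e
            · exact Or.inr ((hmem x).2 ⟨hxt, by simp [e]⟩)
      · intro x hx p hp
        simp only [adjDedup, if_pos h, List.mem_cons] at hx
        have hpg : p ≤ g := hlb g (List.mem_cons_self) p hp
        rcases hx with rfl | hx
        · cases hp; exact lt_of_le_of_ne hpg (fun e => h (by simp [e]))
        · exact lt_of_le_of_lt hpg (hgt x hx g rfl)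
    · rw [ne_eq, not_not] at h
      have ihh := ih ht prev (fun x hx p hp => hlb x (List.mem_cons_of_mem g hx) p hp)
      rcases ihh with ⟨hpw, hmem, hgt⟩
      refine ⟨?_, ?_, ?_⟩
      · simpa only [adjDedup, if_neg (by simp [h] : ¬ some g ≠ prev)] using hpw
      · intro x
        simp only [adjDedup, if_neg (by simp [h] : ¬ some g ≠ prev), List.mem_cons]
        rw [hmem x]
        constructor
        · rintro ⟨hxt, hxp⟩; exact ⟨Or.inr hxt, hxp⟩
        · rintro ⟨(rfl | hxt), hxp⟩
          · exact absurd h hxp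
          · exact ⟨hxt, hxp⟩
      · intro x hx p hp
        simp only [adjDedup, if_neg (by simp [h] : ¬ some g ≠ prev)] at hx
        exact hgt x hx p hp

lemma dedup_sorted_eq (flat : List String) :
    PySem.List.sorted (PySem.Set.ofList flat) (fun g => g)
      = adjDedup (flat.mergeSort (fun a b => decide (a ≤ b))) none := by
  have hs : (flat.mergeSort (fun a b => decide (a ≤ b))).Pairwise (· ≤ ·) := by
    have := List.pairwise_mergeSort (le := fun a b : String => decide (a ≤ b))
      (fun a b c hab hbc => by
        simp only [decide_eq_true_eq] at *; exact le_trans hab hbc)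
      (fun a b => by simp [le_total]) flat
    exact this.imp (fun h => by simpa using h)
  have hm := adj_main (flat.mergeSort (fun a b => decide (a ≤ b))) hs none (by simp)
  rcases hm with ⟨hlt, hmem, _⟩
  apply PySem.List.sorted_eq_of_perm_of_pairwise_lt
  · refine (List.perm_ext_iff_of_nodup ?_ (PySem.Set.nodup_ofList flat)).2 ?_
    · exact hlt.imp (fun h => ne_of_lt h)
    · intro a
      rw [hmem a]
      simp [PySem.Set.mem_ofList, (List.mergeSort_perm flat _).mem_iff]
  · exact hlt

-- ===== VERDICT (by name: the statement is the Claim_ definition above) =====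
theorem build_ngram_vocab_spec : Claim_equal_build_ngram_vocab := by
  intro words ns _
  unfold Spec_build_ngram_vocab build_ngram_vocab build_ngram_vocab_alt
  dsimp only
  rw [bscan, enum_tag,
    show (PySem.Set.empty : PySem.Set String) = PySem.Set.ofList [] from rfl,
    seen_eq, dedup_sorted_eq]
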